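-- pv_equiv track=rewrite | github.com/Morboz/spec-kit-demo | src/blokus_game/models/piece.py | _rotate_coordinates
-- ===== SOURCE A (Python) =====
-- def _rotate_coordinates(
--     coords: list[tuple[int, int]], degrees: int
-- ) -> list[tuple[int, int]]:
--     """
--     Rotate coordinates by specified degrees.
--
--     Args:
--         coords: List of (row, col) coordinates
--         degrees: Rotation angle
--
--     Returns:
--         List of rotated coordinates
--     """
--     if degrees == 90:
--         # (x, y) -> (-y, x)
--         return [(-y, x) for x, y in coords]
--     elif degrees == 180:
--         # (x, y) -> (-x, -y)
--         return [(-x, -y) for x, y in coords]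
--     elif degrees == 270:
--         # (x, y) -> (y, -x)
--         return [(y, -x) for x, y in coords]
--     else:
--         raise ValueError(f"Invalid rotation angle: {degrees}")
-- ===== SOURCE B (Python) =====
-- def _rotate_coordinates(
--     coords: list[tuple[int, int]], degrees: int
-- ) -> list[tuple[int, int]]:
--     if degrees not in (90, 180, 270):
--         raise ValueError(f"Invalid rotation angle: {degrees}")
--     result = coords
--     for _ in range(degrees // 90):
--         result = [(-y, x) for x, y in result]
--     return result
-- ===== Notes on version B (the rewrite author's own statement) =====
-- stated objective: simpler
-- what changed: B replaces A's three hard-coded closed-form maps with one primitive 90-degree rotation (x,y)->(-y,x) applied degrees//90 times.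
import Mathlib
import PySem

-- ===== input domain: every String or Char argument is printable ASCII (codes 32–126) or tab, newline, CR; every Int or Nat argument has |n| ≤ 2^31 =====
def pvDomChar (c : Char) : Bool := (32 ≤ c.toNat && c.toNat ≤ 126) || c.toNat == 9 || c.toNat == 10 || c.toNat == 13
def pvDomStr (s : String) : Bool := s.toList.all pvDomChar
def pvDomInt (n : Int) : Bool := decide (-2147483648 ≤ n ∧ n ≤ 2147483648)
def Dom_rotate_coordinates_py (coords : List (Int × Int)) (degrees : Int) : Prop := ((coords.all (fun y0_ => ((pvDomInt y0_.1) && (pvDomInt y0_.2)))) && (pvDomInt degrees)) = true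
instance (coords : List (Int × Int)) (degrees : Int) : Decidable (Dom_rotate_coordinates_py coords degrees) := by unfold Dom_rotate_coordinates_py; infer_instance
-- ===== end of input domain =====

-- ===== PORT A =====
-- Literal port of A: three closed-form maps selected by degrees.
-- (A raises ValueError on degrees outside {90,180,270}; excluded by Pre_.)
def rotate_coordinates_py (coords : List (Int × Int)) (degrees : Int) : List (Int × Int) :=
  if degrees = 90 then coords.map (fun p => (-p.2, p.1))
  else if degrees = 180 then coords.map (fun p => (-p.1, -p.2))
  else if degrees = 270 then coords.map (fun p => (p.2, -p.1))
  else []  -- unreachable under Pre_ (Python raises ValueError here)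

-- ===== PORT B =====
-- Port of B: one primitive 90° rotation applied (degrees // 90) times.
def pvRot90 (xs : List (Int × Int)) : List (Int × Int) :=
  xs.map (fun p => (-p.2, p.1))

def rotate_coordinates_py_alt (coords : List (Int × Int)) (degrees : Int) : List (Int × Int) :=
  if degrees = 90 ∨ degrees = 180 ∨ degrees = 270 then
    (List.range (PySem.Int.floordiv degrees 90).toNat).foldl (fun acc _ => pvRot90 acc) coords
  else []  -- unreachable under Pre_ (Python raises ValueError here)

-- ===== PRECONDITION & SPEC =====
-- Pre_ excludes exactly the degrees on which A raises ValueError.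
def Pre_rotate_coordinates_py (coords : List (Int × Int)) (degrees : Int) : Prop :=
  degrees = 90 ∨ degrees = 180 ∨ degrees = 270
instance (coords : List (Int × Int)) (degrees : Int) : Decidable (Pre_rotate_coordinates_py coords degrees) := by unfold Pre_rotate_coordinates_py; infer_instance
def pvWitness_rotate_coordinates_py : (List (Int × Int)) × Int := ([(1, 2), (0, -1)], 180)
def Spec_rotate_coordinates_py (coords : List (Int × Int)) (degrees : Int) (out : List (Int × Int)) : Prop := out = rotate_coordinates_py_alt coords degrees
instance (coords : List (Int × Int)) (degrees : Int) (out : List (Int × Int)) : Decidable (Spec_rotate_coordinates_py coords degrees out) := by unfold Spec_rotate_coordinates_py; infer_instance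

-- ===== CLAIM (what is proved, stated in full; the proofs are below) =====
def Claim_equal_rotate_coordinates_py : Prop := ∀ (coords : List (Int × Int)) (degrees : Int), Dom_rotate_coordinates_py coords degrees → Pre_rotate_coordinates_py coords degrees → Spec_rotate_coordinates_py coords degrees (rotate_coordinates_py coords degrees)

-- ===== LEMMAS AND PROOFS =====

-- ===== VERDICT (by name: the statement is the Claim_ definition above) =====
theorem rotate_coordinates_py_spec : Claim_equal_rotate_coordinates_py := by
  intro coords degrees _ hpre
  unfold Spec_rotate_coordinates_py rotate_coordinates_py rotate_coordinates_py_alt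
  rcases hpre with h | h | h <;> subst h <;>
    simp [PySem.Int.floordiv, List.range_succ, pvRot90]
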